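-- pv_equiv track=rewrite | github.com/MrBrantCode/unitest_baseline | mut_generate/mist_train_cf/cf_93217/solution.py | count_character_in_parentheses
-- ===== SOURCE A (Python) =====
-- def count_character_in_parentheses(input_string, character):
--     count = 0
--     inside_parentheses = False
--
--     for char in input_string:
--         if char == '(':
--             inside_parentheses = True
--         elif char == ')':
--             inside_parentheses = False
--         elif char == character and inside_parentheses:
--             count += 1
--
--     return count
-- ===== SOURCE B (Python) =====
-- def count_character_in_parentheses(input_string, character):
--     total = 0
--     for segment in input_string.split(')'):
--         opened = segment.partition('(')[2]
--         total += sum(ch == character for ch in opened if ch != '(')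
--     return total
-- ===== Notes on version B (the rewrite author's own statement) =====
-- stated objective: faster
-- what changed: B is stateless: instead of A's per-character pass with an inside_parentheses toggle flag, B splits the input on ')' into segments, takes in each segment the text after its first '(' via str.partition, and sums the matches of the character there (skipping '(' chars); bracket scanning moves to C-level str.split/str.partition.
import Mathlib
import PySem

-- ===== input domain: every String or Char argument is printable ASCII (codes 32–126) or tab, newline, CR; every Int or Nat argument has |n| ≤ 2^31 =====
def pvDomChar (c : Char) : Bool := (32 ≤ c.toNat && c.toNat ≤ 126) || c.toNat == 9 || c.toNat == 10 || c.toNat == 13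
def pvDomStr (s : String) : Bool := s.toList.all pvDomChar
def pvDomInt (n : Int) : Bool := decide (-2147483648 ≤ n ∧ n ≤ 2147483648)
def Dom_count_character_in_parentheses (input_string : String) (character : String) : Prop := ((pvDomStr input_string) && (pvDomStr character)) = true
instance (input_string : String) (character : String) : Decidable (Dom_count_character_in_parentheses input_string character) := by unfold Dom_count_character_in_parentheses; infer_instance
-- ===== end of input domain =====

-- B is stateless: it splits the input on ')' and counts the character after each
-- segment's first '(' instead of threading A's inside_parentheses flag; same O(n) cost.

-- ===== PORT A =====
-- A's single pass: state (count, inside_parentheses); `char == character` compares a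
-- 1-char string with the `character` string, ported as String.mk [c] = character.
def pvLoopA : List Char → String → Int → Bool → Int
  | [], _, count, _ => count
  | c :: rest, character, count, inside =>
    if c = '(' then pvLoopA rest character count true
    else if c = ')' then pvLoopA rest character count false
    else if String.mk [c] = character ∧ inside = true then pvLoopA rest character (count + 1) inside
    else pvLoopA rest character count inside

def count_character_in_parentheses (input_string : String) (character : String) : Int :=
  pvLoopA input_string.toList character 0 false

-- ===== PORT B =====
-- segment.partition('(')[2]: the part after the first '(' ('' if none) — exact.
def pvOpened (seg : List Char) : List Char :=
  (seg.dropWhile (· ≠ '(')).drop 1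

-- sum(ch == character for ch in opened if ch != '(') — exact.
def pvSegCount (seg : List Char) (character : String) : Int :=
  (((pvOpened seg).filter (· ≠ '(')).countP (fun ch => String.mk [ch] = character) : Int)

-- split(')') ported as List.splitOn ')' (Python's sep-split, keeping empty pieces).
def count_character_in_parentheses_alt (input_string : String) (character : String) : Int :=
  (input_string.toList.splitOn ')').foldl
    (fun total seg => total + pvSegCount seg character) 0

-- ===== PRECONDITION & SPEC =====
def Spec_count_character_in_parentheses (input_string : String) (character : String) (out : Int) : Prop := out = count_character_in_parentheses_alt input_string character
instance (input_string : String) (character : String) (out : Int) : Decidable (Spec_count_character_in_parentheses input_string character out) := by unfold Spec_count_character_in_parentheses; infer_instance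

-- ===== CLAIM (what is proved, stated in full; the proofs are below) =====
def Claim_equal_count_character_in_parentheses : Prop := ∀ (input_string : String) (character : String), Dom_count_character_in_parentheses input_string character → Spec_count_character_in_parentheses input_string character (count_character_in_parentheses input_string character)

-- ===== LEMMAS AND PROOFS =====

-- the contents of a flag-true region (everything up to the next ')'), as B counts it
def pvInsideCount (seg : List Char) (character : String) : Int :=
  ((seg.filter (· ≠ '(')).countP (fun ch => String.mk [ch] = character) : Int)

theorem pvSegCount_cons (c : Char) (seg : List Char) (character : String) :
    pvSegCount (c :: seg) character =
      if c = '(' then pvInsideCount seg character else pvSegCount seg character := by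
  by_cases h : c = '('
  · simp [pvSegCount, pvOpened, pvInsideCount, h, List.dropWhile]
  · simp [pvSegCount, pvOpened, h, List.dropWhile]

theorem pvFoldl_segSum (ss : List (List Char)) (character : String) (a : Int) :
    ss.foldl (fun total seg => total + pvSegCount seg character) a
      = a + (ss.map (fun seg => pvSegCount seg character)).sum := by
  induction ss generalizing a with
  | nil => simp
  | cons h t ih => simp [List.foldl, ih]; ring

-- the joint loop invariant: from flag=false A accumulates the per-segment counts of
-- the ')'-split of the rest; from flag=true it first counts the current region fully.
theorem pvLoopA_split (l : List Char) (character : String) :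
    (∀ count : Int, pvLoopA l character count false
        = count + ((l.splitOn ')').map (fun seg => pvSegCount seg character)).sum)
    ∧ (∀ count : Int, ∀ h t, l.splitOn ')' = h :: t →
        pvLoopA l character count true
          = count + pvInsideCount h character
              + (t.map (fun seg => pvSegCount seg character)).sum) := by
  induction l with
  | nil =>
    constructor
    · intro count; simp [pvLoopA, pvSegCount, pvOpened]
    · intro count h t hsplit
      simp [List.splitOn] at hsplit
      obtain ⟨rfl, rfl⟩ := hsplit
      simp [pvLoopA, pvInsideCount]
  | cons c rest ih =>
    obtain ⟨ihF, ihT⟩ := ih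
    obtain ⟨rh, rt, hr⟩ := List.exists_cons_of_ne_nil
      (List.splitOnP_ne_nil (· == ')') rest)
    by_cases hc : c = ')'
    · have hsp : (c :: rest).splitOn ')' = [] :: rest.splitOn ')' := by
        simp [List.splitOn, hc]
      constructor
      · intro count
        simp only [pvLoopA, if_neg (by simp [hc] : ¬ c = '('), if_pos hc, hsp]
        simp [ihF count, pvSegCount, pvOpened]
      · intro count h t hsplit
        rw [hsp] at hsplit
        injection hsplit with h1 h2
        subst h1; subst h2
        simp only [pvLoopA, if_neg (by simp [hc] : ¬ c = '('), if_pos hc]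
        simp [ihF count, pvInsideCount]
    · have hsp : (c :: rest).splitOn ')' = (c :: rh) :: rt := by
        simp only [List.splitOn] at hr ⊢
        simp [List.splitOnP_cons, hc, hr]
      by_cases hp : c = '('
      · constructor
        · intro count
          simp only [pvLoopA, if_pos hp, hsp]
          rw [ihT count rh rt (by simpa [List.splitOn] using hr)]
          simp [pvSegCount_cons, hp]
          ring
        · intro count h t hsplit
          rw [hsp] at hsplit
          injection hsplit with h1 h2
          subst h1; subst h2
          simp only [pvLoopA, if_pos hp]
          rw [ihT count rh rt (by simpa [List.splitOn] using hr)]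
          simp [pvInsideCount, hp]
      · constructor
        · intro count
          simp only [pvLoopA, if_neg hp, if_neg hc,
            if_neg (by simp : ¬ (String.mk [c] = character ∧ false = true)), hsp]
          rw [ihF count]
          simp [pvSegCount_cons, hp, hr, List.splitOn]
        · intro count h t hsplit
          rw [hsp] at hsplit
          injection hsplit with h1 h2
          subst h1; subst h2
          by_cases hm : String.mk [c] = character
          · simp only [pvLoopA, if_neg hp, if_neg hc]
            rw [ihT (count + 1) rh rt (by simpa [List.splitOn] using hr)]
            simp [pvInsideCount, hp, hm]
            ring
          · simp only [pvLoopA, if_neg hp, if_neg hc]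
            rw [ihT count rh rt (by simpa [List.splitOn] using hr)]
            simp [pvInsideCount, hp, hm]

-- ===== VERDICT (by name: the statement is the Claim_ definition above) =====
theorem count_character_in_parentheses_spec : Claim_equal_count_character_in_parentheses := by
  intro input_string character _
  unfold Spec_count_character_in_parentheses count_character_in_parentheses count_character_in_parentheses_alt
  rw [(pvLoopA_split input_string.toList character).1 0, pvFoldl_segSum]
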